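-- pv_equiv track=rewrite | github.com/MrBrantCode/unitest_baseline | mut_generate/mist_train_cf/cf_5189/solution.py | kth_smallest_prime
-- ===== SOURCE A (Python) =====
-- def is_prime(num):
--     if num < 2:
--         return False
--     for i in range(2, int(num**0.5) + 1):
--         if num % i == 0:
--             return False
--     return True
--
-- def kth_smallest_prime(numbers, k):
--     primes = set()
--     for num in numbers:
--         if num > 0 and is_prime(num):
--             primes.add(num)
--     sorted_primes = sorted(primes)
--     if k <= len(sorted_primes):
--         return sorted_primes[k-1]
--     else:
--         return None
-- ===== SOURCE B (Python) =====
-- def is_prime(num):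
--     if num < 2:
--         return False
--     for i in range(2, int(num**0.5) + 1):
--         if num % i == 0:
--             return False
--     return True
--
-- def kth_smallest_prime(numbers, k):
--     ps = []
--     prev = None
--     for v in sorted(numbers):
--         if v != prev:
--             prev = v
--             if v > 0 and is_prime(v):
--                 ps.append(v)
--     if k <= len(ps):
--         return ps[k - 1]
--     return None
-- ===== Notes on version B (the rewrite author's own statement) =====
-- stated objective: alternative
-- what changed: B replaces A's two-phase build-a-set-then-sort-the-primes structure by a single left-to-right scan of the input sorted once, deduplicating adjacent equal values with a previous-value sentinel and appending primes in increasing order, so no set and no second sorting phase exist.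
import Mathlib
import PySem

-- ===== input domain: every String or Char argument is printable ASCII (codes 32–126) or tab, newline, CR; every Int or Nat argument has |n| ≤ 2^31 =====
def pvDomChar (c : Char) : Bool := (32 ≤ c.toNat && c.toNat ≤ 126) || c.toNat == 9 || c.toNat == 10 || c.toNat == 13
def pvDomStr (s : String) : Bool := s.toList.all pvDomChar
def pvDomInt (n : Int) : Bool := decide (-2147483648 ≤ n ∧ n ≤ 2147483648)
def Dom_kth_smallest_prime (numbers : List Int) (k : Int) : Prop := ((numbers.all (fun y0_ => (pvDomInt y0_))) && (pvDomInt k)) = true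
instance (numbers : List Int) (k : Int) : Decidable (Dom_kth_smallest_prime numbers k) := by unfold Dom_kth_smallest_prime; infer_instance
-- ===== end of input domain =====

-- B rebuilds the sorted distinct-prime list by one scan of the sorted input with a previous-value
-- sentinel (adjacency dedup) instead of A's set-then-sort; same cost, different structure ("alternative").

-- ===== PORT A =====
-- is_prime: `int(num**0.5)` is exact integer sqrt on this domain (|num| ≤ 2^31), ported as Nat.sqrt;
-- the early-return loop over range(2, ...) is the short-circuiting List.all.
def is_prime (num : Int) : Bool :=
  if num < 2 then false
  else (PySem.List.pyRange 2 ((Nat.sqrt num.toNat : Int) + 1) 1).all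
         (fun i => !(PySem.Int.mod num i == 0))

def kth_smallest_prime (numbers : List Int) (k : Int) : Option Int :=
  let primes : PySem.Set Int :=
    numbers.foldl (fun s num => if decide (num > 0) && is_prime num then PySem.Set.add s num else s)
      PySem.Set.empty
  let sorted_primes := PySem.List.sorted primes (fun x => x) false
  if k ≤ (sorted_primes.length : Int) then PySem.List.pyGet? sorted_primes (k - 1) else none

-- ===== PORT B =====
-- `v != prev` where prev starts as None: int-vs-None is always unequal
def pyNe (v : Int) (prev : Option Int) : Bool :=
  match prev with | none => true | some p => decide (v ≠ p)

-- Source B's for-loop over sorted(numbers) with state (prev, ps), transcribed as structural recursion.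
def altLoop (prev : Option Int) (ps : List Int) : List Int → List Int
  | [] => ps
  | v :: rest =>
    if pyNe v prev then
      if decide (v > 0) && is_prime v then altLoop (some v) (ps ++ [v]) rest
      else altLoop (some v) ps rest
    else altLoop prev ps rest

def kth_smallest_prime_alt (numbers : List Int) (k : Int) : Option Int :=
  let ps := altLoop none [] (PySem.List.sorted numbers (fun x => x) false)
  if k ≤ (ps.length : Int) then PySem.List.pyGet? ps (k - 1) else none

-- ===== PRECONDITION & SPEC =====
-- Pre_ excludes exactly the inputs (k ≤ 0 with fewer than 1-k distinct positive primes) on which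
-- both A and B raise IndexError via the negative index k-1; A returns on all admitted inputs.
def Pre_kth_smallest_prime (numbers : List Int) (k : Int) : Prop :=
  1 ≤ k ∨ 1 - k ≤ (((PySem.List.dedup numbers).filter
      (fun x => decide (0 < x ∧ Nat.Prime x.toNat))).length : Int)
instance (numbers : List Int) (k : Int) : Decidable (Pre_kth_smallest_prime numbers k) := by
  unfold Pre_kth_smallest_prime; infer_instance

def pvWitness_kth_smallest_prime : List Int × Int := ([4, 3, 7, 3, -2], 2)

def Spec_kth_smallest_prime (numbers : List Int) (k : Int) (out : Option Int) : Prop := out = kth_smallest_prime_alt numbers k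
instance (numbers : List Int) (k : Int) (out : Option Int) : Decidable (Spec_kth_smallest_prime numbers k out) := by unfold Spec_kth_smallest_prime; infer_instance

-- ===== CLAIM (what is proved, stated in full; the proofs are below) =====
def Claim_equal_kth_smallest_prime : Prop := ∀ (numbers : List Int) (k : Int), Dom_kth_smallest_prime numbers k → Pre_kth_smallest_prime numbers k → Spec_kth_smallest_prime numbers k (kth_smallest_prime numbers k)

-- ===== LEMMAS AND PROOFS =====

-- the prime filter both programs apply
def pvP (v : Int) : Bool := decide (v > 0) && is_prime v

lemma pyNe_iff (v : Int) (prev : Option Int) : pyNe v prev = true ↔ prev ≠ some v := by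
  cases prev with
  | none => simp [pyNe]
  | some p =>
    simp only [pyNe, decide_eq_true_eq, ne_eq, Option.some.injEq]
    constructor
    · intro h hc; exact h hc.symm
    · intro h hc; exact h (by rw [hc])

-- accumulator-free form of B's loop
def altScan : Option Int → List Int → List Int
  | _, [] => []
  | prev, v :: rest =>
    if pyNe v prev then (if pvP v then [v] else []) ++ altScan (some v) rest
    else altScan prev rest

lemma altLoop_eq_scan (xs : List Int) : ∀ prev ps, altLoop prev ps xs = ps ++ altScan prev xs := by
  induction xs with
  | nil => intro prev ps; simp [altLoop, altScan]
  | cons v rest ih =>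
    intro prev ps
    simp only [altLoop, altScan, pvP]
    by_cases h1 : pyNe v prev = true
    · rw [if_pos h1, if_pos h1]
      by_cases h2 : (decide (v > 0) && is_prime v) = true
      · rw [if_pos h2, if_pos h2, ih, List.append_assoc]
      · rw [if_neg h2, if_neg h2, ih]; simp
    · rw [if_neg h1, if_neg h1, ih]

lemma prev_of_not_pyNe {v : Int} {prev : Option Int} (h : ¬ pyNe v prev = true) : prev = some v := by
  by_contra hc; exact h ((pyNe_iff v prev).mpr hc)

lemma mem_altScan (xs : List Int) : ∀ (prev : Option Int),
    xs.Pairwise (· ≤ ·) → (∀ p, prev = some p → ∀ y ∈ xs, p ≤ y) →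
    ∀ x, x ∈ altScan prev xs ↔ (pvP x = true ∧ x ∈ xs ∧ prev ≠ some x) := by
  induction xs with
  | nil => intro prev _ _ x; simp [altScan]
  | cons v rest ih =>
    intro prev hs hprev x
    have hsrest : rest.Pairwise (· ≤ ·) := hs.tail
    have hvle : ∀ y ∈ rest, v ≤ y := fun y hy => (List.pairwise_cons.mp hs).1 y hy
    have hb : ∀ p, (some v : Option Int) = some p → ∀ y ∈ rest, p ≤ y := by
      intro p hp y hy; cases hp; exact hvle y hy
    have ihh := ih (some v) hsrest hb x
    simp only [altScan]
    by_cases hm : pyNe v prev = true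
    · rw [if_pos hm]
      have hne : prev ≠ some v := (pyNe_iff v prev).mp hm
      constructor
      · intro hx
        rcases List.mem_append.mp hx with hx | hx
        · cases hP : pvP v with
          | false => rw [hP] at hx; simp at hx
          | true =>
            rw [hP] at hx
            have : x = v := by simpa using hx
            subst this; exact ⟨hP, by simp, hne⟩
        · obtain ⟨hpx, hxr, hxv⟩ := ihh.mp hx
          refine ⟨hpx, by simp [hxr], ?_⟩
          intro hcon
          cases prev with
          | none => simp at hcon
          | some p =>
            have hpx' : p = x := by simpa using hcon
            subst hpx'
            have h1' : p ≤ v := hprev p rfl v (by simp)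
            have h2' : v ≤ p := hvle p hxr
            exact hxv (by simp [le_antisymm h2' h1'])
      · rintro ⟨hpx, hxm, _⟩
        rcases List.mem_cons.mp hxm with hxv | hxr
        · subst hxv; exact List.mem_append.mpr (Or.inl (by simp [hpx]))
        · by_cases hxv : x = v
          · subst hxv; exact List.mem_append.mpr (Or.inl (by simp [hpx]))
          · exact List.mem_append.mpr (Or.inr (ihh.mpr
              ⟨hpx, hxr, by simpa using fun h => hxv h.symm⟩))
    · rw [if_neg hm]
      have hpv := prev_of_not_pyNe hm
      subst hpv
      rw [ihh]
      constructor
      · rintro ⟨hpx, hxr, hxv⟩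
        exact ⟨hpx, by simp [hxr], hxv⟩
      · rintro ⟨hpx, hxm, hxv⟩
        rcases List.mem_cons.mp hxm with hxv' | hxr
        · exact absurd (by simp [hxv']) hxv
        · exact ⟨hpx, hxr, hxv⟩

lemma pairwise_altScan (xs : List Int) : ∀ (prev : Option Int),
    xs.Pairwise (· ≤ ·) → (∀ p, prev = some p → ∀ y ∈ xs, p ≤ y) →
    (altScan prev xs).Pairwise (· < ·) := by
  induction xs with
  | nil => intro prev _ _; simp [altScan]
  | cons v rest ih =>
    intro prev hs hprev
    have hsrest : rest.Pairwise (· ≤ ·) := hs.tail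
    have hvle : ∀ y ∈ rest, v ≤ y := fun y hy => (List.pairwise_cons.mp hs).1 y hy
    have hb : ∀ p, (some v : Option Int) = some p → ∀ y ∈ rest, p ≤ y := by
      intro p hp y hy; cases hp; exact hvle y hy
    have htail := ih (some v) hsrest hb
    simp only [altScan]
    by_cases hm : pyNe v prev = true
    · rw [if_pos hm]
      by_cases hP : pvP v = true
      · rw [if_pos hP]
        simp only [List.singleton_append]
        refine List.pairwise_cons.mpr ⟨?_, htail⟩
        intro y hy
        obtain ⟨_, hyr, hyv⟩ := (mem_altScan rest (some v) hsrest hb y).mp hy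
        rcases lt_or_eq_of_le (hvle y hyr) with h | h
        · exact h
        · exact absurd (by simp [h]) hyv
      · rw [if_neg hP]; simpa using htail
    · rw [if_neg hm]
      have hpv := prev_of_not_pyNe hm
      subst hpv
      exact ih (some v) hsrest hb

-- A's accumulated set is set(filter(P, numbers))
lemma aset_eq (numbers : List Int) :
    numbers.foldl (fun s num => if decide (num > 0) && is_prime num then PySem.Set.add s num else s)
      PySem.Set.empty = PySem.Set.ofList (numbers.filter pvP) := by
  have h := PySem.List.foldl_if_eq_foldl_filter (p := pvP)
      (f := fun (s : PySem.Set Int) (num : Int) => PySem.Set.add s num)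
      (l := numbers) (init := PySem.Set.empty)
  simpa [pvP, PySem.Set.ofList_eq_foldl, PySem.Set.empty] using h

-- The two sorted distinct-prime lists coincide
lemma lists_eq (numbers : List Int) :
    PySem.List.sorted (PySem.Set.ofList (numbers.filter pvP)) (fun x => x) false
      = altScan none (PySem.List.sorted numbers (fun x => x) false) := by
  set S := PySem.List.sorted numbers (fun x => x) false with hS
  have hsortS : S.Pairwise (· ≤ ·) := by
    simpa using PySem.List.sorted_pairwise (xs := numbers) (key := fun x => x)
  have hb : ∀ p, (none : Option Int) = some p → ∀ y ∈ S, p ≤ y := by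
    intro p hp; cases hp
  have hmem : ∀ x, x ∈ altScan none S ↔ (pvP x = true ∧ x ∈ numbers) := by
    intro x
    rw [mem_altScan S none hsortS hb x]
    constructor
    · rintro ⟨h1, h2, _⟩
      exact ⟨h1, (PySem.List.mem_sorted numbers (fun x => x) false x).mp h2⟩
    · rintro ⟨h1, h2⟩
      exact ⟨h1, (PySem.List.mem_sorted numbers (fun x => x) false x).mpr h2, by simp⟩
  have hpw : (altScan none S).Pairwise (· < ·) := pairwise_altScan S none hsortS hb
  have hnd : (altScan none S).Nodup := hpw.imp ne_of_lt
  have hperm : (altScan none S).Perm (PySem.Set.ofList (numbers.filter pvP)) := by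
    rw [List.perm_ext_iff_of_nodup hnd (PySem.Set.nodup_ofList _)]
    intro a
    rw [hmem a, PySem.Set.mem_ofList, List.mem_filter]
    tauto
  exact PySem.List.sorted_eq_of_perm_of_pairwise_lt _ _ _ hperm hpw

-- ===== VERDICT (by name: the statement is the Claim_ definition above) =====
theorem kth_smallest_prime_spec : Claim_equal_kth_smallest_prime := by
  intro numbers k _ _
  show kth_smallest_prime numbers k = kth_smallest_prime_alt numbers k
  unfold kth_smallest_prime kth_smallest_prime_alt
  simp only [altLoop_eq_scan, aset_eq, lists_eq, List.nil_append]
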